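-- pv_equiv track=rewrite | github.com/jasminezhoulab/cfSNV | inst/python/py8.machinelearn.extract_features_from_reads_filter_cluster.py | extract_nearby_indel
-- ===== SOURCE A (Python) =====
-- CIGAR_CHARACTER = "MSIDHNPX="
--
-- def find_all_occurrence_in_string(string):
-- 	return [i for (i, c) in enumerate(string) if c in CIGAR_CHARACTER]
--
-- def find_indel_position(cigar_split, cigar_string, position):
-- 	insertion_start = []
-- 	current = position
-- 	string_index = [i for i in cigar_split]
-- 	string_index.insert(0,-1)
-- 	#print cigar_split, string_index
-- 	for i in range(len(cigar_split)):
-- 		#print insertion_start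
-- 		id = cigar_split[i]
-- 		#print i, cigar_split[i], string_index[i],string_index[i+1]
-- 		length = int(cigar_string[(string_index[i]+1):string_index[i+1]])
-- 		#print id, length, i
-- 		if cigar_string[id] == "I":
-- 			insertion_start.append(current - 1)
-- 			insertion_start.append(current)
-- 		elif cigar_string[id] == "D":
-- 			start = current - 1
-- 			current += length
-- 			end = current + 1
-- 			insertion_start = insertion_start + list(range(start, end))
-- 		elif cigar_string[id] in "MX=N":
-- 			current += length
-- 	return insertion_start
--
-- def extract_nearby_indel(variant_position, mapping_position, CIGAR_string):
-- 	cigar_split = find_all_occurrence_in_string(CIGAR_string)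
-- 	all_location_involved_in_indel = find_indel_position(cigar_split, CIGAR_string, mapping_position)
-- 	if all_location_involved_in_indel == []:
-- 		return "-1"
-- 	else:
-- 		distance_to_variant_position = [abs(i - variant_position) for i in all_location_involved_in_indel]
-- 		return str(min(distance_to_variant_position))
-- ===== SOURCE B (Python) =====
-- CIGAR_CHARACTER = "MSIDHNPX="
--
-- def extract_nearby_indel(variant_position, mapping_position, CIGAR_string):
--     # Single pass over the CIGAR string keeping a running minimum distance;
--     # each deletion interval contributes its minimum in O(1) by clamping
--     # the variant position to the interval, instead of enumerating every
--     # deleted position.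
--     best = None
--     prev = -1
--     current = mapping_position
--     for i, c in enumerate(CIGAR_string):
--         if c not in CIGAR_CHARACTER:
--             continue
--         length = int(CIGAR_string[prev + 1:i])
--         prev = i
--         if c == "I":
--             d = min(abs(current - 1 - variant_position),
--                     abs(current - variant_position))
--             best = d if best is None else min(best, d)
--         elif c == "D":
--             lo = current - 1
--             current += length
--             hi = current
--             if lo <= hi:
--                 if variant_position < lo:
--                     d = lo - variant_position
--                 elif variant_position > hi:
--                     d = variant_position - hi
--                 else:
--                     d = 0
--                 best = d if best is None else min(best, d)
--         elif c in "MX=N":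
--             current += length
--     return "-1" if best is None else str(best)
-- ===== Notes on version B (the rewrite author's own statement) =====
-- stated objective: alternative
-- what changed: Instead of materialising every reference position covered by an indel (two per insertion, length+2 per deletion) and then taking the min of all distances, B makes a single pass over the CIGAR string keeping a running minimum, computing each deletion interval's minimum distance in O(1) by clamping the variant position to the interval.
import Mathlib
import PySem

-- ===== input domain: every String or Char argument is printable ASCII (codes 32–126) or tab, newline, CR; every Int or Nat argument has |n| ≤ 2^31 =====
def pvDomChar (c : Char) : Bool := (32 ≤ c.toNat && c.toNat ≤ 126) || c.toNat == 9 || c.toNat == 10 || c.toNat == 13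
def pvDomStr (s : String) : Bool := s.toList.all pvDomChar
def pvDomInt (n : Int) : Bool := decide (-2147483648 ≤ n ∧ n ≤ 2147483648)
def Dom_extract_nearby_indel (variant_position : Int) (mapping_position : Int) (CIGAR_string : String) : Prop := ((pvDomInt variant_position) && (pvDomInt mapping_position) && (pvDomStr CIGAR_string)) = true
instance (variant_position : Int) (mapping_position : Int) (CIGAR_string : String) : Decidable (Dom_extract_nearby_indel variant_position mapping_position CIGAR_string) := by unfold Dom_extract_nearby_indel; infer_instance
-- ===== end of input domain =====

-- B replaces A's "enumerate every position covered by an indel, then take min of distances"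
-- by a single pass keeping a running minimum, each deletion interval contributing its
-- minimum distance in O(1) by clamping (objective: alternative algorithm).

-- ===== PORT A =====

-- CIGAR_CHARACTER = "MSIDHNPX="; 'c in CIGAR_CHARACTER' for the single char c is membership
def pvCC : List Char := "MSIDHNPX=".toList

-- [i for (i, c) in enumerate(string) if c in CIGAR_CHARACTER]
def find_all_occurrence_in_string (s : List Char) : List Int :=
  ((PySem.List.enumerate s).filter (fun p => decide (p.2 ∈ pvCC))).map (·.1)

-- the 'for i in range(len(cigar_split))' loop of find_indel_position, as structural
-- recursion over cigar_split; prev carries string_index[i] (initially the inserted -1),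
-- id is string_index[i+1] = cigar_split[i] — the same values the Python loop reads.
def find_indel_loop (s : List Char) (ids : List Int) (prev : Int) (current : Int)
    (acc : List Int) : List Int :=
  match ids with
  | [] => acc
  | id :: rest =>
    -- length = int(cigar_string[(string_index[i]+1):string_index[i+1]]); Pre_ makes int() succeed
    let length : Int :=
      (PySem.Int.ofStr? (String.ofList (PySem.List.slice s (some (prev + 1)) (some id)))).getD 0
    let c : Char := PySem.List.pyGetD s id ' '   -- cigar_string[id]; id is a valid index
    if c = 'I' then
      find_indel_loop s rest id current (acc ++ [current - 1, current])
    else if c = 'D' then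
      find_indel_loop s rest id (current + length)
        (acc ++ PySem.List.pyRange (current - 1) (current + length + 1))
    else if c ∈ ['M', 'X', '=', 'N'] then
      find_indel_loop s rest id (current + length) acc
    else
      find_indel_loop s rest id current acc

def find_indel_position (cigar_split : List Int) (s : List Char) (position : Int) : List Int :=
  find_indel_loop s cigar_split (-1) position []

def extract_nearby_indel (variant_position : Int) (mapping_position : Int)
    (CIGAR_string : String) : String :=
  let cigar_split := find_all_occurrence_in_string CIGAR_string.toList
  let all_location_involved_in_indel :=
    find_indel_position cigar_split CIGAR_string.toList mapping_position
  if all_location_involved_in_indel = [] then "-1"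
  else
    let distance_to_variant_position :=
      all_location_involved_in_indel.map (fun i => |i - variant_position|)
    PySem.Int.toStr ((PySem.List.min? distance_to_variant_position (fun x => x)).getD 0)

-- ===== PORT B =====

-- 'd if best is None else min(best, d)'
def pvOptMin (best : Option Int) (d : Int) : Option Int :=
  match best with
  | none => some d
  | some b => some (min b d)

-- B's single 'for i, c in enumerate(CIGAR_string)' loop, carrying (prev, current, best)
def extract_nearby_indel_alt_loop (v : Int) (s : List Char) (items : List (Int × Char))
    (prev current : Int) (best : Option Int) : Option Int :=
  match items with
  | [] => best
  | (i, c) :: rest =>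
    if c ∉ pvCC then
      extract_nearby_indel_alt_loop v s rest prev current best
    else
      let length : Int :=
        (PySem.Int.ofStr? (String.ofList (PySem.List.slice s (some (prev + 1)) (some i)))).getD 0
      if c = 'I' then
        extract_nearby_indel_alt_loop v s rest i current
          (pvOptMin best (min |current - 1 - v| |current - v|))
      else if c = 'D' then
        let lo := current - 1
        let cur' := current + length
        if lo ≤ cur' then
          extract_nearby_indel_alt_loop v s rest i cur'
            (pvOptMin best (if v < lo then lo - v else if cur' < v then v - cur' else 0))
        else
          extract_nearby_indel_alt_loop v s rest i cur' best
      else if c ∈ ['M', 'X', '=', 'N'] then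
        extract_nearby_indel_alt_loop v s rest i (current + length) best
      else
        extract_nearby_indel_alt_loop v s rest i current best

def extract_nearby_indel_alt (variant_position : Int) (mapping_position : Int)
    (CIGAR_string : String) : String :=
  match extract_nearby_indel_alt_loop variant_position CIGAR_string.toList
      (PySem.List.enumerate CIGAR_string.toList) (-1) mapping_position none with
  | none => "-1"
  | some d => PySem.Int.toStr d

-- ===== PRECONDITION & SPEC =====

-- segments of the CIGAR string lying before each CIGAR operation character
-- (defined independently of the ports)
def pvSegsGo (cs : List Char) (buf : List Char) : List (List Char) :=
  match cs with
  | [] => []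
  | c :: r => if c ∈ pvCC then buf :: pvSegsGo r [] else pvSegsGo r (buf ++ [c])

-- Pre_ excludes exactly the inputs on which Python's int() raises ValueError: some
-- segment before an operation character is not int()-parsable (e.g. empty).
def Pre_extract_nearby_indel (variant_position : Int) (mapping_position : Int)
    (CIGAR_string : String) : Prop :=
  ∀ seg ∈ pvSegsGo CIGAR_string.toList [],
    (PySem.Int.ofStr? (String.ofList seg)).isSome = true

instance (variant_position : Int) (mapping_position : Int) (CIGAR_string : String) : Decidable (Pre_extract_nearby_indel variant_position mapping_position CIGAR_string) := by unfold Pre_extract_nearby_indel; infer_instance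

def pvWitness_extract_nearby_indel : Int × Int × String := (7, 3, "5M2I3D10M")

def Spec_extract_nearby_indel (variant_position : Int) (mapping_position : Int) (CIGAR_string : String) (out : String) : Prop := out = extract_nearby_indel_alt variant_position mapping_position CIGAR_string
instance (variant_position : Int) (mapping_position : Int) (CIGAR_string : String) (out : String) : Decidable (Spec_extract_nearby_indel variant_position mapping_position CIGAR_string out) := by unfold Spec_extract_nearby_indel; infer_instance

-- ===== CLAIM (what is proved, stated in full; the proofs are below) =====
def Claim_equal_extract_nearby_indel : Prop := ∀ (variant_position : Int) (mapping_position : Int) (CIGAR_string : String), Dom_extract_nearby_indel variant_position mapping_position CIGAR_string → Pre_extract_nearby_indel variant_position mapping_position CIGAR_string → Spec_extract_nearby_indel variant_position mapping_position CIGAR_string (extract_nearby_indel variant_position mapping_position CIGAR_string)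

-- ===== LEMMAS AND PROOFS =====

-- the running minimum of |x - v| over a list, in B's Option form
def pvMinMap (v : Int) (xs : List Int) : Option Int :=
  xs.foldl (fun b x => pvOptMin b |x - v|) none

theorem pvOptMin_optMin (b : Option Int) (x y : Int) :
    pvOptMin (pvOptMin b x) y = pvOptMin b (min x y) := by
  cases b <;> simp [pvOptMin, min_assoc]

theorem pvFoldl_optMin_some (v : Int) (t : List Int) (m : Int) :
    t.foldl (fun b x => pvOptMin b |x - v|) (some m)
      = some (t.foldl (fun m x => min m |x - v|) m) := by
  induction t generalizing m with
  | nil => rfl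
  | cons x t ih =>
    rw [List.foldl_cons, show pvOptMin (some m) |x - v| = some (min m |x - v|) from rfl,
      List.foldl_cons]
    exact ih _

theorem pvMinMap_nonempty (v : Int) (a : Int) (t : List Int) :
    pvMinMap v (a :: t)
      = some ((PySem.List.min? ((a :: t).map (fun i => |i - v|)) (fun x => x)).getD 0) := by
  rw [List.map_cons, PySem.List.min?_id_cons, Option.getD_some]
  simp only [pvMinMap, List.foldl_cons]
  rw [show pvOptMin none |a - v| = some |a - v| from rfl, pvFoldl_optMin_some, List.foldl_map]

-- minimum distance from v to the interval [lo, hi], folded over range(lo, hi+1)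
theorem pvRange_min (v : Int) (hi : Int) : ∀ (lo : Int), lo ≤ hi → ∀ (b : Option Int),
    (PySem.List.pyRange lo (hi + 1)).foldl (fun b x => pvOptMin b |x - v|) b
      = pvOptMin b (if v < lo then lo - v else if hi < v then v - hi else 0) := by
  have key : ∀ (n : Nat) (lo : Int), (hi - lo).toNat = n → lo ≤ hi → ∀ (b : Option Int),
      (PySem.List.pyRange lo (hi + 1)).foldl (fun b x => pvOptMin b |x - v|) b
        = pvOptMin b (if v < lo then lo - v else if hi < v then v - hi else 0) := by
    intro n
    induction n with
    | zero =>
      intro lo hn hle b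
      have hlo : lo = hi := by omega
      subst hlo
      rw [PySem.List.pyRange_one_cons (by omega), PySem.List.pyRange_one_eq_nil (by omega)]
      have : |lo - v| = if v < lo then lo - v else if lo < v then v - lo else 0 := by
        rcases abs_cases (lo - v) with ⟨he, _⟩ | ⟨he, _⟩ <;> rw [he] <;> split_ifs <;> omega
      simp [this]
    | succ n ih =>
      intro lo hn hle b
      have hlt : lo < hi := by omega
      rw [PySem.List.pyRange_one_cons (by omega)]
      simp only [List.foldl_cons]
      rw [ih (lo + 1) (by omega) (by omega), pvOptMin_optMin]
      congr 1
      rcases abs_cases (lo - v) with ⟨he, _⟩ | ⟨he, _⟩ <;> rw [he] <;>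
        simp only [min_def] <;> split_ifs <;> omega
  intro lo hle b
  exact key (hi - lo).toNat lo rfl hle b

-- B's loop ignores characters outside CIGAR_CHARACTER
theorem altLoop_filter (v : Int) (s : List Char) :
    ∀ (items : List (Int × Char)) (prev current : Int) (best : Option Int),
    extract_nearby_indel_alt_loop v s items prev current best
      = extract_nearby_indel_alt_loop v s (items.filter (fun p => decide (p.2 ∈ pvCC)))
          prev current best := by
  intro items
  induction items with
  | nil => intro _ _ _; rfl
  | cons p rest ih =>
    intro prev current best
    obtain ⟨i, c⟩ := p
    rw [List.filter_cons]
    by_cases h : c ∈ pvCC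
    · simp only [h, decide_true, if_true]
      rw [extract_nearby_indel_alt_loop, extract_nearby_indel_alt_loop]
      simp only [h, not_true_eq_false, if_false]
      split_ifs <;> exact ih ..
    · simp only [h, decide_false]
      rw [extract_nearby_indel_alt_loop]
      simp only [h, not_false_eq_true, if_true]
      exact ih ..


theorem pvMain (v : Int) (s : List Char) :
    ∀ (items : List (Int × Char)),
      (∀ p ∈ items, p.2 ∈ pvCC ∧ PySem.List.pyGetD s p.1 ' ' = p.2) →
    ∀ (prev current : Int) (acc : List Int),
      pvMinMap v (find_indel_loop s (items.map (·.1)) prev current acc)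
        = extract_nearby_indel_alt_loop v s items prev current (pvMinMap v acc) := by
  intro items
  induction items with
  | nil => intro _ _ _ _; rfl
  | cons p rest ih =>
    intro hmem prev current acc
    obtain ⟨i, c⟩ := p
    obtain ⟨hc, hget⟩ := hmem (i, c) (List.mem_cons_self)
    have hrest := fun q hq => hmem q (List.mem_cons_of_mem _ hq)
    rw [List.map_cons, find_indel_loop, extract_nearby_indel_alt_loop]
    simp only [hget, hc, not_true_eq_false, if_false]
    by_cases hI : c = 'I'
    · rw [if_pos hI, if_pos hI]
      rw [ih hrest]
      congr 1
      unfold pvMinMap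
      rw [List.foldl_append]
      simp only [List.foldl_cons, List.foldl_nil]
      rw [pvOptMin_optMin]
    · by_cases hD : c = 'D'
      · rw [if_neg hI, if_neg hI, if_pos hD, if_pos hD]
        by_cases hle : current - 1 ≤ current +
            (PySem.Int.ofStr? (String.ofList (PySem.List.slice s (some (prev + 1)) (some i)))).getD 0
        · rw [ih hrest, if_pos hle]
          congr 1
          unfold pvMinMap
          rw [List.foldl_append]
          rw [pvRange_min v _ (current - 1) (by omega)]
        · rw [ih hrest, if_neg hle]
          congr 1
          unfold pvMinMap
          rw [PySem.List.pyRange_one_eq_nil (by omega), List.append_nil]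
      · rw [if_neg hI, if_neg hI, if_neg hD, if_neg hD]
        by_cases hM : c ∈ ['M', 'X', '=', 'N']
        · rw [if_pos hM, if_pos hM]; exact ih hrest ..
        · rw [if_neg hM, if_neg hM]; exact ih hrest ..


-- ===== VERDICT (by name: the statement is the Claim_ definition above) =====
theorem extract_nearby_indel_spec : Claim_equal_extract_nearby_indel := by
  intro v mp cig _dom _pre
  unfold Spec_extract_nearby_indel
  have hitems : ∀ p ∈ (PySem.List.enumerate cig.toList).filter (fun p => decide (p.2 ∈ pvCC)),
      p.2 ∈ pvCC ∧ PySem.List.pyGetD cig.toList p.1 ' ' = p.2 := by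
    intro p hp
    have hmem := List.mem_of_mem_filter hp
    have hcc : p.2 ∈ pvCC := by
      have := List.of_mem_filter hp
      simpa using this
    rw [PySem.List.mem_enumerate_iff] at hmem
    obtain ⟨k, hk, rfl⟩ := hmem
    refine ⟨hcc, ?_⟩
    simp [PySem.List.pyGetD_natCast, List.getD_eq_getElem?_getD, List.getElem?_eq_getElem hk]
  have hmain := pvMain v cig.toList _ hitems (-1) mp []
  rw [show pvMinMap v ([] : List Int) = none from rfl, ← altLoop_filter] at hmain
  show (if find_indel_loop cig.toList
        (((PySem.List.enumerate cig.toList).filter (fun p => decide (p.2 ∈ pvCC))).map (·.1))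
        (-1) mp [] = [] then "-1"
      else PySem.Int.toStr ((PySem.List.min?
        ((find_indel_loop cig.toList
          (((PySem.List.enumerate cig.toList).filter (fun p => decide (p.2 ∈ pvCC))).map (·.1))
          (-1) mp []).map (fun i => |i - v|)) (fun x => x)).getD 0))
    = match extract_nearby_indel_alt_loop v cig.toList (PySem.List.enumerate cig.toList)
        (-1) mp none with
      | none => "-1"
      | some d => PySem.Int.toStr d
  cases hall : find_indel_loop cig.toList
      (((PySem.List.enumerate cig.toList).filter (fun p => decide (p.2 ∈ pvCC))).map (·.1))
      (-1) mp [] with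
  | nil =>
    rw [hall] at hmain
    rw [← hmain]
    simp [pvMinMap]
  | cons a t =>
    rw [hall] at hmain
    rw [pvMinMap_nonempty] at hmain
    rw [← hmain]
    simp
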